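-- pv_equiv track=rewrite | github.com/florenciarouco/tallerDeGit | comisionB.py | sufijos
-- ===== SOURCE A (Python) =====
-- from typing import List
--
-- def sufijos (texto:str) -> List[str]:
--     res:List[str] = []
--
--     for i in range (len(texto)):
--         sufijo = ""
--         for j in range (i,len(texto)):
--             sufijo += texto[j]
--         res.append (sufijo)
--     return res
-- ===== SOURCE B (Python) =====
-- from typing import List
--
-- def sufijos(texto: str) -> List[str]:
--     # Single backward pass: each suffix extends the previous one by one char.
--     res: List[str] = []
--     prev = ""
--     for ch in reversed(texto):
--         prev = ch + prev
--         res.append(prev)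
--     res.reverse()
--     return res
-- ===== Notes on version B (the rewrite author's own statement) =====
-- stated objective: faster
-- what changed: Replaces the nested loops that rebuild each suffix character by character with a single backward pass maintaining a running suffix accumulator, each suffix derived from the previous one.
import Mathlib
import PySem

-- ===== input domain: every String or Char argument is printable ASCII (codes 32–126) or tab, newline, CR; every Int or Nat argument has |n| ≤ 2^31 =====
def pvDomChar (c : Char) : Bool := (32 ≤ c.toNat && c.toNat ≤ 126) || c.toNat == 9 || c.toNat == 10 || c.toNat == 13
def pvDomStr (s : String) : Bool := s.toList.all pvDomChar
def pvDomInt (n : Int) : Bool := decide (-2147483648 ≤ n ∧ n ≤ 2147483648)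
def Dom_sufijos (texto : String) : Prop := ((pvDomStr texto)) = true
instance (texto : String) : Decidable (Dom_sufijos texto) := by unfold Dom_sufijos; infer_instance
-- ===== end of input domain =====

-- B replaces A's nested suffix-rebuilding loops by one backward pass with a running-suffix accumulator.


-- ===== PORT A =====
def sufijos (texto : String) : List String :=
  let cs := texto.toList
  (PySem.List.pyRange 0 (cs.length : Int) 1).foldl
    (fun res i =>
      let sufijo := (PySem.List.pyRange i (cs.length : Int) 1).foldl
        (fun suf j => suf ++ [PySem.List.pyGetD cs j ' ']) []
      res ++ [String.mk sufijo]) []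

-- ===== PORT B =====
def sufijos_alt (texto : String) : List String :=
  let st := texto.toList.reverse.foldl
    (fun (st : List Char × List String) ch =>
      let prev := ch :: st.1
      (prev, st.2 ++ [String.mk prev])) ([], [])
  st.2.reverse

-- ===== PRECONDITION & SPEC =====
def Spec_sufijos (texto : String) (out : List String) : Prop := out = sufijos_alt texto
instance (texto : String) (out : List String) : Decidable (Spec_sufijos texto out) := by unfold Spec_sufijos; infer_instance

-- ===== CLAIM (what is proved, stated in full; the proofs are below) =====
def Claim_equal_sufijos : Prop := ∀ (texto : String), Dom_sufijos texto → Spec_sufijos texto (sufijos texto)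

-- ===== LEMMAS AND PROOFS =====

-- A's inner loop collects exactly the characters of cs.drop i
lemma inner_eq (cs : List Char) (i : Nat) :
    (PySem.List.pyRange (i : Int) (cs.length : Int) 1).map
      (fun j => PySem.List.pyGetD cs j ' ') = cs.drop i := by
  by_cases h : i < cs.length
  · rw [PySem.List.pyRange_one_cons (by exact_mod_cast h)]
    have : ((i : Int) + 1) = ((i + 1 : Nat) : Int) := by push_cast; ring
    rw [List.map_cons, this, inner_eq cs (i + 1)]
    simp [PySem.List.pyGetD_natCast, List.getD_eq_getElem?_getD, List.getElem?_eq_getElem h,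
      List.getElem_cons_drop h]
  · have hle : (cs.length : Int) ≤ (i : Int) := by exact_mod_cast Nat.le_of_not_lt h
    rw [PySem.List.pyRange_of_pos _ _ (by norm_num)]
    rw [if_neg (by omega)]
    simp [List.drop_eq_nil_of_le (Nat.le_of_not_lt h)]
termination_by cs.length - i

-- A equals the list of suffixes shortest-last
lemma sufijos_eq_spec (texto : String) :
    sufijos texto
      = (List.range texto.toList.length).map (fun i => String.mk (texto.toList.drop i)) := by
  unfold sufijos
  rw [PySem.List.foldl_append_singleton_eq_map
    (fun i => String.mk ((PySem.List.pyRange i (texto.toList.length : Int) 1).foldl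
      (fun suf j => suf ++ [PySem.List.pyGetD texto.toList j ' ']) []))]
  rw [PySem.List.pyRange_zero_natCast, List.map_map, List.nil_append]
  refine List.map_congr_left (fun i _ => ?_)
  simp only [Function.comp_apply]
  rw [PySem.List.foldl_append_singleton_eq_map, List.nil_append, inner_eq]

-- B's backward fold builds the nonempty suffixes of cs (each extended by p), longest-last
lemma bfold_eq (cs : List Char) : ∀ (p : List Char) (acc : List String),
    cs.reverse.foldl
      (fun (st : List Char × List String) ch =>
        let prev := ch :: st.1
        (prev, st.2 ++ [String.mk prev])) (p, acc)
      = (cs ++ p,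
         acc ++ (List.range cs.length).reverse.map (fun i => String.mk (cs.drop i ++ p))) := by
  induction cs using List.reverseRecOn with
  | nil => intro p acc; simp
  | append_singleton ds c ih =>
    intro p acc
    rw [List.reverse_append, List.reverse_singleton, List.singleton_append, List.foldl_cons]
    simp only []
    rw [ih (c :: p) (acc ++ [String.mk (c :: p)])]
    refine Prod.ext (by simp) ?_
    simp only [List.length_append, List.length_singleton, List.range_succ, List.reverse_append,
      List.reverse_singleton, List.singleton_append, List.map_cons, List.drop_left,
      List.singleton_append, List.append_assoc]
    congr 2
    refine List.map_congr_left (fun i hi => ?_)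
    have hi' : i < ds.length := by
      rw [List.mem_reverse, List.mem_range] at hi; exact hi
    rw [List.drop_append_of_le_length (Nat.le_of_lt hi')]
    simp

lemma sufijos_alt_eq_spec (texto : String) :
    sufijos_alt texto
      = (List.range texto.toList.length).map (fun i => String.mk (texto.toList.drop i)) := by
  unfold sufijos_alt
  simp only [bfold_eq texto.toList [] []]
  simp [← List.map_reverse]

-- ===== VERDICT (by name: the statement is the Claim_ definition above) =====
theorem sufijos_spec : Claim_equal_sufijos := by
  intro texto _
  unfold Spec_sufijos
  rw [sufijos_eq_spec, sufijos_alt_eq_spec]
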